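-- pv_equiv track=rewrite | github.com/henriquem27/School-Projects | CS220/BSsets.py | sx1
-- ===== SOURCE A (Python) =====
-- def stringn(n,c):
--     c=str(c)
--     return n*c
--
--     '''
--   given bit string bs of size n,
--   return the next (boolean increment)
--   e.g.  '00000' -> '00001'
--         '01011' -> '01100'
--         '11111' -> '00000'
--     '''
--
-- def next(bs,n):
--     return '{:0{}b}'.format(int(bs, 2) + 1, n)[-n:]
--
--
--     '''
--     return the set of all length n>=2 bitstrings
--     that start with '11' or end with '1'
--
--     '''
--
-- def sx1(n):
--     l=[]
--
--     x=stringn(n,0)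
--     l.append(x)
--     i=1
--     while i<(2**n):
--         x=next(x,n)
--         l.append(x)
--         i=i+1
--
--     start='11'
--     ends='1'
--
--     res1 = [x for x in l if x.endswith(ends)]
--
--
--     return set(res1)
--
--
--     ''' provided '''
-- ===== SOURCE B (Python) =====
-- def sx1(n):
--     res = set()
--     i = 1
--     while i < 2**n:
--         res.add(format(i, '0{}b'.format(n)))
--         i += 2
--     return res
-- ===== Notes on version B (the rewrite author's own statement) =====
-- stated objective: simpler
-- what changed: B builds the set directly by formatting each odd integer below 2**n instead of enumerating all 2**n bitstrings by repeated string increment and filtering those ending in '1'.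
import Mathlib
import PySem

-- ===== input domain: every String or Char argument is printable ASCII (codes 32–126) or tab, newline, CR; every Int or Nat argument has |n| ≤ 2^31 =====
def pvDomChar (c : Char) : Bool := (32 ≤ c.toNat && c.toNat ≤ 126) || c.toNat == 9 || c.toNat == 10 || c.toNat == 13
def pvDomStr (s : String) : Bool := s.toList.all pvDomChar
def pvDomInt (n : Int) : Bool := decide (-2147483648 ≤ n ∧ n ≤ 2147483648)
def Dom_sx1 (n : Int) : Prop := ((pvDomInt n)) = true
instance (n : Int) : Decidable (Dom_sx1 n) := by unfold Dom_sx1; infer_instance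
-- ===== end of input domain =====

-- B builds the set directly by formatting each odd integer below 2**n instead of
-- enumerating all 2**n bitstrings by repeated string increment and filtering (objective: simpler).

-- Binary digits of v, most significant first ([] for 0); the digit list behind Python's
-- '{:0{n}b}' format, which both Pythons invoke (A inside next(), B via format(i, '0nb')).
def pvBits : Nat → List Char
  | v => if v = 0 then [] else pvBits (v / 2) ++ [if v % 2 = 1 then '1' else '0']
  termination_by v => v
  decreasing_by exact Nat.div_lt_self (Nat.pos_of_ne_zero (by assumption)) (by omega)

def pvBinDigits (v : Nat) : List Char := if v = 0 then ['0'] else pvBits v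

-- format(v, '0{}b'.format(n)) — exact for v ≥ 0 (the only values either program formats)
def pvFormatBin (v : Int) (n : Int) : String :=
  String.ofList (List.replicate (n.toNat - (pvBinDigits v.toNat).length) '0' ++ pvBinDigits v.toNat)

-- ===== PORT A =====
-- int(s, 2) — exact on strings of '0'/'1' characters (the only strings A parses)
def sx1BinParse (s : String) : Nat :=
  s.toList.foldl (fun a c => 2 * a + (if c = '1' then 1 else 0)) 0

-- next(bs, n) = '{:0{}b}'.format(int(bs, 2) + 1, n)[-n:]
def sx1Next (bs : String) (n : Int) : String :=
  PySem.Str.slice (pvFormatBin ((sx1BinParse bs : Int) + 1) n) (some (-n)) none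

-- the while loop: k remaining iterations of 'x = next(x, n); l.append(x)'
-- (l is carried reversed and reversed once at the end — the usual accumulator encoding)
def sx1Loop (n : Int) : Nat → String → List String → List String
  | 0, _, l => l.reverse
  | k + 1, x, l => sx1Loop n k (sx1Next x n) (sx1Next x n :: l)

def sx1 (n : Int) : List String :=
  -- l starts as [stringn(n, 0)] = [n * '0']; 'i = 1; while i < 2**n: …; i += 1' runs
  -- 2**n - 1 times for n ≥ 0 and never for n < 0 (2**n is then a float below 1)
  PySem.Set.ofList
    ((sx1Loop n (if 0 ≤ n then 2 ^ n.toNat - 1 else 0)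
        (String.ofList (List.replicate n.toNat '0'))
        [String.ofList (List.replicate n.toNat '0')]).filter
      (fun x => PySem.Str.endswith x "1"))

-- ===== PORT B =====
-- the while loop: k remaining iterations of 'res.add(format(i, …)); i += 2'
def sx1AltLoop (n : Int) : Nat → Int → PySem.Set String → PySem.Set String
  | 0, _, res => res
  | k + 1, i, res => sx1AltLoop n k (i + 2) (PySem.Set.add res (pvFormatBin i n))

def sx1_alt (n : Int) : List String :=
  -- 'i = 1; while i < 2**n: …; i += 2' runs 2**(n-1) times for n ≥ 1, never for n ≤ 0
  sx1AltLoop n (if 1 ≤ n then 2 ^ (n.toNat - 1) else 0) 1 PySem.Set.empty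

-- ===== PRECONDITION & SPEC =====
def Spec_sx1 (n : Int) (out : List String) : Prop := out = sx1_alt n
instance (n : Int) (out : List String) : Decidable (Spec_sx1 n out) := by unfold Spec_sx1; infer_instance

-- ===== CLAIM (what is proved, stated in full; the proofs are below) =====
def Claim_equal_sx1 : Prop := ∀ (n : Int), Dom_sx1 n → Spec_sx1 n (sx1 n)

-- ===== LEMMAS AND PROOFS =====

-- proof-side abbreviation: the formatted string of a natural number
def pvF (n : Int) (u : Nat) : String := pvFormatBin (u : Int) n

theorem pvBits_zero : pvBits 0 = [] := by unfold pvBits; simp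

theorem pvBits_pos (v : Nat) (h : v ≠ 0) :
    pvBits v = pvBits (v / 2) ++ [if v % 2 = 1 then '1' else '0'] := by
  conv_lhs => unfold pvBits
  simp [h]

theorem pvBits_parse (v : Nat) : ∀ a : Nat,
    (pvBits v).foldl (fun a c => 2 * a + (if c = '1' then 1 else 0)) a =
      a * 2 ^ (pvBits v).length + v := by
  induction v using Nat.strong_induction_on with
  | _ v ih =>
    intro a
    by_cases h : v = 0
    · subst h; simp [pvBits_zero]
    · rw [pvBits_pos v h]
      rw [List.foldl_append]
      rw [ih (v / 2) (Nat.div_lt_self (Nat.pos_of_ne_zero h) (by omega)) a]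
      simp only [List.foldl_cons, List.foldl_nil, List.length_append, List.length_singleton]
      have hv : v = 2 * (v / 2) + v % 2 := (Nat.div_add_mod v 2).symm ▸ by omega
      by_cases hp : v % 2 = 1 <;> simp [hp] <;> ring_nf <;> omega

theorem foldl_zeros (m : Nat) : ∀ a : Nat,
    (List.replicate m '0').foldl (fun a c => 2 * a + (if c = '1' then 1 else 0)) a = a * 2 ^ m := by
  induction m with
  | zero => simp
  | succ k ihk => intro a; simp [List.replicate_succ, ihk, pow_succ]; ring_nf

theorem parse_format (v : Nat) (n : Int) : sx1BinParse (pvF n v) = v := by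
  unfold pvF pvFormatBin sx1BinParse
  simp only [Int.toNat_natCast, String.toList_ofList]
  rw [List.foldl_append, foldl_zeros]
  simp only [Nat.zero_mul]
  unfold pvBinDigits
  by_cases h : v = 0
  · simp [h]
  · simp only [h, if_false]
    rw [pvBits_parse v 0]
    simp

theorem pvF_inj (n : Int) (v w : Nat) (h : pvF n v = pvF n w) : v = w := by
  have := congrArg sx1BinParse h
  rwa [parse_format, parse_format] at this

theorem pvBits_length_le (N : Nat) : ∀ v : Nat, v < 2 ^ N → (pvBits v).length ≤ N := by
  induction N with
  | zero => intro v hv; interval_cases v; simp [pvBits_zero]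
  | succ k ihk =>
    intro v hv
    by_cases h : v = 0
    · simp [h, pvBits_zero]
    · rw [pvBits_pos v h]
      have h2 : v / 2 < 2 ^ k := by omega
      have := ihk (v / 2) h2
      simp only [List.length_append, List.length_singleton]
      omega

theorem pvBinDigits_length_le (N : Nat) (v : Nat) (hN : 1 ≤ N) (hv : v < 2 ^ N) :
    (pvBinDigits v).length ≤ N := by
  unfold pvBinDigits
  by_cases h : v = 0
  · simp [h]; omega
  · simp only [h, if_false]; exact pvBits_length_le N v hv

theorem pvF_length (n : Int) (v : Nat) (hn : 1 ≤ n) (hv : v < 2 ^ n.toNat) :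
    (pvF n v).toList.length = n.toNat := by
  unfold pvF pvFormatBin
  simp only [Int.toNat_natCast, String.toList_ofList, List.length_append, List.length_replicate]
  have := pvBinDigits_length_le n.toNat v (by omega) hv
  omega

theorem endswith_pvF (n : Int) (v : Nat) :
    PySem.Str.endswith (pvF n v) "1" = decide (v % 2 = 1) := by
  unfold pvF pvFormatBin pvBinDigits
  by_cases hp : v % 2 = 1
  · have h0 : v ≠ 0 := by omega
    simp only [Int.toNat_natCast, h0, if_false]
    rw [pvBits_pos v h0]
    simp only [hp, if_true, decide_eq_true hp]
    rw [PySem.Str.endswith]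
    apply (PySem.Chars.endswith_iff _ _).mpr
    refine ⟨List.replicate (n.toNat - (pvBits (v / 2) ++ ['1']).length) '0' ++ pvBits (v / 2), ?_⟩
    simp
  · -- last digit is '0'
    have hds : ∃ ds, (if v = 0 then ['0'] else pvBits v) = ds ++ ['0'] := by
      by_cases h0 : v = 0
      · exact ⟨[], by simp [h0]⟩
      · refine ⟨pvBits (v / 2), ?_⟩
        rw [if_neg h0, pvBits_pos v h0]
        simp [hp]
    obtain ⟨ds, hds⟩ := hds
    simp only [Int.toNat_natCast, hds, decide_eq_false hp]
    rw [PySem.Str.endswith]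
    apply Bool.eq_false_iff.mpr
    intro hc
    obtain ⟨t, ht⟩ := (PySem.Chars.endswith_iff _ _).mp hc
    simp only [String.toList_ofList] at ht
    rw [← List.append_assoc] at ht
    obtain ⟨-, h2⟩ := List.append_inj' ht rfl
    exact absurd h2 (by decide)

-- next() on a formatted value below the wrap point increments it
theorem next_pvF (n : Int) (v : Nat) (hn : 1 ≤ n) (hv : v + 1 < 2 ^ n.toNat) :
    sx1Next (pvF n v) n = pvF n (v + 1) := by
  unfold sx1Next
  rw [show pvFormatBin ((sx1BinParse (pvF n v) : Int) + 1) n = pvF n (v + 1) by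
    rw [parse_format]
    have hc : ((v : Int) + 1) = ((v + 1 : Nat) : Int) := by push_cast; ring
    simp only [pvF]
    rw [hc]]
  have hlen : (pvF n (v + 1)).toList.length = n.toNat := pvF_length n (v + 1) hn hv
  have hneg : (-n : Int) = -((n.toNat : Nat) : Int) := by omega
  have hk : 0 < n.toNat := by omega
  rw [PySem.Str.slice, hneg, PySem.Chars.slice_eq_listSlice,
    PySem.List.slice_from_neg_natCast _ n.toNat hk]
  rw [hlen, Nat.sub_self, List.drop_zero, String.ofList_toList]

-- A's loop starting at a formatted value appends the next k formatted values
theorem sx1Loop_eq (n : Int) (hn : 1 ≤ n) : ∀ (k v : Nat) (l : List String),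
    v + k < 2 ^ n.toNat →
    sx1Loop n k (pvF n v) l = l.reverse ++ (List.range' (v + 1) k).map (pvF n) := by
  intro k
  induction k with
  | zero => intro v l _; simp [sx1Loop]
  | succ m ihm =>
    intro v l hb
    rw [sx1Loop, next_pvF n v hn (by omega), ihm (v + 1) _ (by omega), List.range'_succ]
    simp

-- B's loop appends the next k formatted odd values (they are all new, so add appends)
theorem sx1AltLoop_eq (n : Int) : ∀ (k j : Nat),
    sx1AltLoop n k (2 * (j : Int) + 1) ((List.range j).map (fun u => pvF n (2 * u + 1))) =
      (List.range (j + k)).map (fun u => pvF n (2 * u + 1)) := by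
  intro k
  induction k with
  | zero => intro j; simp [sx1AltLoop]
  | succ m ihm =>
    intro j
    rw [sx1AltLoop]
    have hfmt : pvFormatBin (2 * (j : Int) + 1) n = pvF n (2 * j + 1) := by
      have hc : (2 * (j : Int) + 1) = ((2 * j + 1 : Nat) : Int) := by push_cast; ring
      simp only [pvF]
      rw [hc]
    have hnew : pvF n (2 * j + 1) ∉ (List.range j).map (fun u => pvF n (2 * u + 1)) := by
      intro hmem
      obtain ⟨u, hu, hequ⟩ := List.mem_map.mp hmem
      have := pvF_inj n _ _ hequ
      simp only [List.mem_range] at hu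
      omega
    have hadd : PySem.Set.add ((List.range j).map (fun u => pvF n (2 * u + 1)))
        (pvFormatBin (2 * (j : Int) + 1) n) =
        (List.range (j + 1)).map (fun u => pvF n (2 * u + 1)) := by
      rw [hfmt, PySem.Set.add, if_neg (by simpa [PySem.Set.contains] using hnew),
        List.range_succ, List.map_append]
      simp
    rw [hadd, show (2 * (j : Int) + 1) + 2 = 2 * ((j + 1 : Nat) : Int) + 1 by push_cast; ring,
      show j + (m + 1) = (j + 1) + m from by omega]
    exact ihm (j + 1)

-- filtering the formatted range keeps exactly the odd values
theorem filter_pvF (n : Int) (m : Nat) :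
    ((List.range m).map (pvF n)).filter (fun x => PySem.Str.endswith x "1") =
      ((List.range m).filter (fun u => decide (u % 2 = 1))).map (pvF n) := by
  rw [List.filter_map]
  congr 1
  apply List.filter_congr
  intro u _
  simp only [Function.comp_apply]
  rw [endswith_pvF]

-- odd numbers below 2*m, in order
theorem filter_odd_range (m : Nat) :
    (List.range (2 * m)).filter (fun u => decide (u % 2 = 1)) =
      (List.range m).map (fun u => 2 * u + 1) := by
  induction m with
  | zero => simp
  | succ k ihk =>
    rw [show 2 * (k + 1) = (2 * k + 1) + 1 from by ring, List.range_succ, List.range_succ,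
      List.filter_append, List.filter_append, ihk, List.range_succ, List.map_append]
    have he : (2 * k) % 2 = 0 := by omega
    have ho : (2 * k + 1) % 2 = 1 := by omega
    simp [List.filter_cons, he, ho]

-- the filtered list has no duplicates, so set() keeps it as is
theorem nodup_mapped (n : Int) (l : List Nat) (hl : l.Nodup) : (l.map (pvF n)).Nodup := by
  apply List.Nodup.map_on _ hl
  intro a _ b _ h
  exact pvF_inj n a b h

-- main positive case
theorem sx1_eq_of_pos (n : Int) (hn : 1 ≤ n) : sx1 n = sx1_alt n := by
  have hN : 1 ≤ n.toNat := by omega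
  have hpow : 1 ≤ 2 ^ n.toNat := Nat.one_le_two_pow
  have hx0 : String.ofList (List.replicate n.toNat '0') = pvF n 0 := by
    have h1 : pvBinDigits 0 = ['0'] := by unfold pvBinDigits; simp
    unfold pvF pvFormatBin
    rw [show ((0 : Nat) : Int).toNat = 0 from by simp, h1]
    simp only [List.length_singleton]
    rw [show n.toNat = (n.toNat - 1) + 1 from by omega]
    congr 1
    rw [Nat.add_sub_cancel, ← List.replicate_succ']
  unfold sx1
  rw [if_pos (by omega : (0:Int) ≤ n), hx0, sx1Loop_eq n hn (2 ^ n.toNat - 1) 0 _ (by omega)]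
  have hrange : (pvF n 0) :: (List.range' (0 + 1) (2 ^ n.toNat - 1)).map (pvF n) =
      (List.range (2 ^ n.toNat)).map (pvF n) := by
    have hr : ∀ m : Nat, 1 ≤ m → List.range m = 0 :: List.range' 1 (m - 1) := by
      intro m hm1
      rw [List.range_eq_range', show m = (m - 1) + 1 from by omega, List.range'_succ]
      simp
    rw [hr _ hpow]
    simp
  simp only [List.reverse_singleton]
  rw [List.singleton_append, hrange, filter_pvF,
    show 2 ^ n.toNat = 2 * 2 ^ (n.toNat - 1) from by rw [← pow_succ']; congr 1; omega,
    filter_odd_range, List.map_map]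
  have hform : ((List.range (2 ^ (n.toNat - 1))).map ((pvF n) ∘ fun u => 2 * u + 1)) =
      (List.range (2 ^ (n.toNat - 1))).map (fun u => pvF n (2 * u + 1)) := by
    simp [Function.comp]
  rw [hform, PySem.Set.ofList_eq_self_of_nodup _ (by
    have hno : ((List.range (2 ^ (n.toNat - 1))).map (fun u => 2 * u + 1)).Nodup := by
      apply List.Nodup.map_on _ List.nodup_range
      intro a _ b _ h
      omega
    have := nodup_mapped n _ hno
    rwa [List.map_map, Function.comp_def] at this)]
  unfold sx1_alt
  rw [if_pos hn]
  have h := sx1AltLoop_eq n (2 ^ (n.toNat - 1)) 0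
  simp only [List.range_zero, List.map_nil, Nat.cast_zero, mul_zero, zero_add] at h
  rw [← h]
  rfl

-- degenerate case n ≤ 0: both programs return the empty set
theorem sx1_eq_of_nonpos (n : Int) (hn : n ≤ 0) : sx1 n = sx1_alt n := by
  rcases eq_or_lt_of_le hn with h0 | h0
  · rw [h0]
    decide
  · have hN : n.toNat = 0 := by omega
    have hnot0 : ¬ (0 : Int) ≤ n := by omega
    have hnot1 : ¬ (1 : Int) ≤ n := by omega
    unfold sx1 sx1_alt
    rw [if_neg hnot0, if_neg hnot1, hN]
    simp only [sx1Loop, sx1AltLoop, List.replicate_zero]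
    decide

-- ===== VERDICT (by name: the statement is the Claim_ definition above) =====
theorem sx1_spec : Claim_equal_sx1 := by
  intro n _
  unfold Spec_sx1
  by_cases hn : 1 ≤ n
  · exact sx1_eq_of_pos n hn
  · exact sx1_eq_of_nonpos n (by omega)
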